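-- pv_equiv track=rewrite | github.com/hlgsdx/tjs2-decompiler | tjs2_formatting.py | _scan_brace_depth
-- ===== SOURCE A (Python) =====
-- def _scan_brace_depth(line, initial_depth):
--     """扫描单行里的大括号深度变化，忽略字符串中的花括号。"""
--     depth = initial_depth
--     in_string = None
--     j = 0
--     while j < len(line):
--         ch = line[j]
--         if in_string:
--             if ch == '\\':
--                 j += 2
--                 continue
--             if ch == in_string:
--                 in_string = None
--         elif ch in ('"', "'"):
--             in_string = ch
--         elif ch == '{':
--             depth += 1
--         elif ch == '}':
--             depth -= 1
--             if depth == 0: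
--                 return True, 0
--         j += 1
--     return False, depth
-- ===== SOURCE B (Python) =====
-- def _collect_braces(line):
--     braces = []
--     in_string = None
--     j = 0
--     while j < len(line):
--         ch = line[j]
--         if in_string:
--             if ch == '\\':
--                 j += 2
--                 continue
--             if ch == in_string:
--                 in_string = None
--         elif ch in ('"', "'"):
--             in_string = ch
--         elif ch in ('{', '}'):
--             braces.append(ch)
--         j += 1
--     return braces
--
--
-- def _scan_brace_depth(line, initial_depth):
--     depth = initial_depth
--     for ch in _collect_braces(line):
--         if ch == '{':
--             depth += 1
--         else:
--             depth -= 1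
--             if depth == 0:
--                 return True, 0
--     return False, depth
-- ===== Notes on version B (the rewrite author's own statement) =====
-- stated objective: alternative
-- what changed: Split the single interleaved state machine into two passes: one pass extracts the braces that lie outside string literals, a second pass folds over that brace list tracking depth with the early exit at depth 0.
import Mathlib
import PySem

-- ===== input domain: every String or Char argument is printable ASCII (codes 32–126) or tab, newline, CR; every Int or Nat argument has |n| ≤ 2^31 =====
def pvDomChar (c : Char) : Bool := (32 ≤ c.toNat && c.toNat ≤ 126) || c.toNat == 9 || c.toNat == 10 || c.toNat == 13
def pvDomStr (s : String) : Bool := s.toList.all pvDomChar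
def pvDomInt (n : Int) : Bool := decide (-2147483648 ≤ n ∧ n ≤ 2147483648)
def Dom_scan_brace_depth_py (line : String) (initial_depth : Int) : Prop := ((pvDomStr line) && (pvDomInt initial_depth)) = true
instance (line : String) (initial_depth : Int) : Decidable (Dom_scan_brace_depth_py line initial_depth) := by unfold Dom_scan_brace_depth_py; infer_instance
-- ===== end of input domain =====

-- B separates A's interleaved scan into two passes: extract out-of-string braces, then fold depth over that list (alternative decomposition, same cost).


-- ===== PORT A =====
-- A's while loop over indices j (j+=2 on backslash inside a string) as recursion on the
-- remaining character list: j+=2 is dropping one extra character (List.tail).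
def scanBraceLoopA : List Char → Option Char → Int → Bool × Int
  | [], _, depth => (false, depth)
  | c :: rest, some q, depth =>
      if c = '\\' then scanBraceLoopA rest.tail (some q) depth
      else if c = q then scanBraceLoopA rest none depth
      else scanBraceLoopA rest (some q) depth
  | c :: rest, none, depth =>
      if c = '"' ∨ c = '\'' then scanBraceLoopA rest (some c) depth
      else if c = '{' then scanBraceLoopA rest none (depth + 1)
      else if c = '}' then
        if depth - 1 = 0 then (true, 0) else scanBraceLoopA rest none (depth - 1)
      else scanBraceLoopA rest none depth
  termination_by chars _ _ => chars.length
  decreasing_by all_goals simp [List.length_tail]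

def scan_brace_depth_py (line : String) (initial_depth : Int) : Bool × Int :=
  scanBraceLoopA line.toList none initial_depth

-- ===== PORT B =====
-- pass 1: collect braces outside strings (same escape rule: backslash skips the next char)
def collectBraces : List Char → Option Char → List Char
  | [], _ => []
  | c :: rest, some q =>
      if c = '\\' then collectBraces rest.tail (some q)
      else if c = q then collectBraces rest none
      else collectBraces rest (some q)
  | c :: rest, none =>
      if c = '"' ∨ c = '\'' then collectBraces rest (some c)
      else if c = '{' ∨ c = '}' then c :: collectBraces rest none
      else collectBraces rest none
  termination_by chars _ => chars.length
  decreasing_by all_goals simp [List.length_tail]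

-- pass 2: fold depth over the brace list with the early exit at depth 0
def foldBraces : List Char → Int → Bool × Int
  | [], depth => (false, depth)
  | c :: rest, depth =>
      if c = '{' then foldBraces rest (depth + 1)
      else if depth - 1 = 0 then (true, 0) else foldBraces rest (depth - 1)

def scan_brace_depth_py_alt (line : String) (initial_depth : Int) : Bool × Int :=
  foldBraces (collectBraces line.toList none) initial_depth

-- ===== PRECONDITION & SPEC =====
def Spec_scan_brace_depth_py (line : String) (initial_depth : Int) (out : Bool × Int) : Prop := out = scan_brace_depth_py_alt line initial_depth
instance (line : String) (initial_depth : Int) (out : Bool × Int) : Decidable (Spec_scan_brace_depth_py line initial_depth out) := by unfold Spec_scan_brace_depth_py; infer_instance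

-- ===== CLAIM (what is proved, stated in full; the proofs are below) =====
def Claim_equal_scan_brace_depth_py : Prop := ∀ (line : String) (initial_depth : Int), Dom_scan_brace_depth_py line initial_depth → Spec_scan_brace_depth_py line initial_depth (scan_brace_depth_py line initial_depth)

-- ===== LEMMAS AND PROOFS =====
theorem scanBraceLoopA_eq_fold_collect (n : Nat) :
    ∀ (chars : List Char), chars.length ≤ n → ∀ (st : Option Char) (depth : Int),
      scanBraceLoopA chars st depth = foldBraces (collectBraces chars st) depth := by
  induction n with
  | zero =>
      intro chars h st depth
      have : chars = [] := List.eq_nil_of_length_eq_zero (Nat.le_zero.mp h)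
      subst this
      cases st <;> simp [scanBraceLoopA, collectBraces, foldBraces]
  | succ n ih =>
      intro chars h st depth
      match chars, st with
      | [], st => cases st <;> simp [scanBraceLoopA, collectBraces, foldBraces]
      | c :: rest, some q =>
          have hr : rest.length ≤ n := by simp only [List.length_cons] at h; omega
          have ht : rest.tail.length ≤ n := by simp only [List.length_tail]; omega
          simp only [scanBraceLoopA, collectBraces]
          split_ifs <;> [exact ih _ ht _ _; exact ih _ hr _ _; exact ih _ hr _ _]
      | c :: rest, none =>
          have hr : rest.length ≤ n := by simp only [List.length_cons] at h; omega
          by_cases hq : c = '"' ∨ c = '\''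
          · simp only [scanBraceLoopA, collectBraces, if_pos hq]
            exact ih _ hr _ _
          · by_cases ho : c = '{'
            · subst ho
              simp only [scanBraceLoopA, collectBraces, if_neg hq, if_true, true_or, foldBraces]
              exact ih _ hr _ _
            · by_cases hc : c = '}'
              · subst hc
                have hno : ¬(('}' : Char) = '{') := by decide
                rw [show scanBraceLoopA ('}' :: rest) none depth
                      = if depth - 1 = 0 then (true, 0) else scanBraceLoopA rest none (depth - 1) from by
                    simp only [scanBraceLoopA, if_neg hq, if_neg hno, if_true],
                  show collectBraces ('}' :: rest) none = '}' :: collectBraces rest none from by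
                    simp only [collectBraces, if_neg hq, or_true, if_true],
                  foldBraces, if_neg hno]
                split_ifs with h0
                · rfl
                · exact ih _ hr _ _
              · have hb : ¬ (c = '{' ∨ c = '}') := by tauto
                simp only [scanBraceLoopA, collectBraces, if_neg hq, if_neg ho, if_neg hc, if_neg hb]
                exact ih _ hr _ _

-- ===== VERDICT (by name: the statement is the Claim_ definition above) =====
theorem scan_brace_depth_py_spec : Claim_equal_scan_brace_depth_py := by
  intro line initial_depth _
  unfold Spec_scan_brace_depth_py scan_brace_depth_py scan_brace_depth_py_alt
  exact scanBraceLoopA_eq_fold_collect line.toList.length line.toList (le_refl _) none initial_depth
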